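-- pv_equiv track=rewrite | github.com/agunther97/crypto | exam1/hill_ciper_decrypt.py | make_matrix_from_text
-- ===== SOURCE A (Python) =====
-- def make_matrix_from_text(text):
--     a=0
--     b=1
--     c=2
--     row_1 = []
--     row_2 = []
--     row_3 = []
--     while c < len(text):
--         row_1.append(text[a])
--         row_2.append(text[b])
--         row_3.append(text[c])
--         a = a+3
--         b = b+3
--         c = c+3
--     matrix = [row_1,row_2,row_3]
--     return matrix
-- ===== SOURCE B (Python) =====
-- def make_matrix_from_text(text):
--     return [[text[3 * i + r] for i in range(len(text) // 3)] for r in range(3)]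
-- ===== Notes on version B (the rewrite author's own statement) =====
-- stated objective: simpler
-- what changed: Replaces the while loop with three parallel accumulator lists and three stride counters by a closed-form count of complete triples (len//3) and direct index comprehensions text[3*i+r].
import Mathlib
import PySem

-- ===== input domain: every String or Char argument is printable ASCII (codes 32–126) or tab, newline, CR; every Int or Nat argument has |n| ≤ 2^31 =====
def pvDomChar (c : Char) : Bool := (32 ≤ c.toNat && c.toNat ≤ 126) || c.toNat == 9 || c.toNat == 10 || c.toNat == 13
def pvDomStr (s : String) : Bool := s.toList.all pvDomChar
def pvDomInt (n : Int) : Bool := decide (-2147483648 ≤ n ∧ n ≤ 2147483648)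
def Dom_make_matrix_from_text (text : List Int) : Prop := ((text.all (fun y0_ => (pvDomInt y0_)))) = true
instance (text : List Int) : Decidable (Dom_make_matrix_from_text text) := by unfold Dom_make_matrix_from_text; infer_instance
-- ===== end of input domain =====

-- B replaces A's while loop (three stride counters, three parallel accumulators) by the
-- closed-form count len//3 and direct index comprehensions: simpler, same cost.

-- ===== PORT A =====
-- the while loop of A: state (a, b, c, row_1, row_2, row_3); indices are always in range
-- when appended (c < len and a < b < c), so pyGetD's default is never read.
def mmLoopA (text : List Int) (a b c : Int) (r1 r2 r3 : List Int) : List (List Int) :=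
  if _h : c < (text.length : Int) then
    mmLoopA text (a + 3) (b + 3) (c + 3)
      (r1 ++ [PySem.List.pyGetD text a 0])
      (r2 ++ [PySem.List.pyGetD text b 0])
      (r3 ++ [PySem.List.pyGetD text c 0])
  else
    [r1, r2, r3]
termination_by ((text.length : Int) - c).toNat
decreasing_by omega

def make_matrix_from_text (text : List Int) : List (List Int) :=
  mmLoopA text 0 1 2 [] [] []

-- ===== PORT B =====
def make_matrix_from_text_alt (text : List Int) : List (List Int) :=
  (PySem.List.pyRange 0 3 1).map (fun r =>
    (PySem.List.pyRange 0 (PySem.Int.floordiv (text.length : Int) 3) 1).map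
      (fun i => PySem.List.pyGetD text (3 * i + r) 0))

-- ===== PRECONDITION & SPEC =====
def Spec_make_matrix_from_text (text : List Int) (out : List (List Int)) : Prop := out = make_matrix_from_text_alt text
instance (text : List Int) (out : List (List Int)) : Decidable (Spec_make_matrix_from_text text out) := by unfold Spec_make_matrix_from_text; infer_instance

-- ===== CLAIM (what is proved, stated in full; the proofs are below) =====
def Claim_equal_make_matrix_from_text : Prop := ∀ (text : List Int), Dom_make_matrix_from_text text → Spec_make_matrix_from_text text (make_matrix_from_text text)

-- ===== LEMMAS AND PROOFS =====

theorem mmLoopA_eq (text : List Int) :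
    ∀ (n j : Nat) (r1 r2 r3 : List Int), n = text.length / 3 - j →
    mmLoopA text (3 * (j : Int)) (3 * (j : Int) + 1) (3 * (j : Int) + 2) r1 r2 r3 =
      [r1 ++ (List.range n).map (fun i => text.getD (3 * (j + i)) 0),
       r2 ++ (List.range n).map (fun i => text.getD (3 * (j + i) + 1) 0),
       r3 ++ (List.range n).map (fun i => text.getD (3 * (j + i) + 2) 0)] := by
  intro n
  induction n with
  | zero =>
    intro j r1 r2 r3 hn
    rw [mmLoopA]
    have : ¬ (3 * (j : Int) + 2 < (text.length : Int)) := by omega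
    simp [this]
  | succ n ih =>
    intro j r1 r2 r3 hn
    rw [mmLoopA]
    have hlt : 3 * (j : Int) + 2 < (text.length : Int) := by omega
    simp only [hlt, dif_pos]
    have e1 : 3 * (j : Int) + 3 = 3 * ((j + 1 : Nat) : Int) := by push_cast; ring
    have e2 : 3 * (j : Int) + 1 + 3 = 3 * ((j + 1 : Nat) : Int) + 1 := by push_cast; ring
    have e3 : 3 * (j : Int) + 2 + 3 = 3 * ((j + 1 : Nat) : Int) + 2 := by push_cast; ring
    rw [e1, e2, e3, ih (j + 1) _ _ _ (by omega)]
    have g1 : PySem.List.pyGetD text (3 * (j : Int)) 0 = text.getD (3 * j) 0 := by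
      rw [show (3 * (j : Int)) = ((3 * j : Nat) : Int) by push_cast; ring,
        PySem.List.pyGetD_natCast]
    have g2 : PySem.List.pyGetD text (3 * (j : Int) + 1) 0 = text.getD (3 * j + 1) 0 := by
      rw [show (3 * (j : Int) + 1) = ((3 * j + 1 : Nat) : Int) by push_cast; ring,
        PySem.List.pyGetD_natCast]
    have g3 : PySem.List.pyGetD text (3 * (j : Int) + 2) 0 = text.getD (3 * j + 2) 0 := by
      rw [show (3 * (j : Int) + 2) = ((3 * j + 2 : Nat) : Int) by push_cast; ring,
        PySem.List.pyGetD_natCast]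
    rw [g1, g2, g3]
    simp only [List.range_succ_eq_map, List.map_cons, List.map_map, Function.comp_def,
      Nat.succ_eq_add_one, Nat.add_zero, List.append_assoc, List.singleton_append]
    refine congrArg₂ List.cons (congrArg (fun t => r1 ++ text.getD (3 * j) 0 :: t) ?_)
      (congrArg₂ List.cons (congrArg (fun t => r2 ++ text.getD (3 * j + 1) 0 :: t) ?_)
        (congrArg₂ List.cons (congrArg (fun t => r3 ++ text.getD (3 * j + 2) 0 :: t) ?_) rfl)) <;>
      (apply List.map_congr_left; intro i _; congr 1; omega)

theorem alt_eq (text : List Int) :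
    make_matrix_from_text_alt text =
      [(List.range (text.length / 3)).map (fun i => text.getD (3 * i) 0),
       (List.range (text.length / 3)).map (fun i => text.getD (3 * i + 1) 0),
       (List.range (text.length / 3)).map (fun i => text.getD (3 * i + 2) 0)] := by
  unfold make_matrix_from_text_alt
  have hk : PySem.Int.floordiv (text.length : Int) 3 = ((text.length / 3 : Nat) : Int) := by
    exact_mod_cast PySem.Int.floordiv_natCast text.length 3
  have hr3 : PySem.List.pyRange 0 3 1 = [0, 1, 2] := by decide
  rw [hk, hr3, PySem.List.pyRange_zero_natCast]
  simp only [List.map_cons, List.map_nil, List.map_map, Function.comp_def]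
  refine congrArg₂ List.cons ?_ (congrArg₂ List.cons ?_ (congrArg₂ List.cons ?_ rfl))
  · apply List.map_congr_left
    intro i _
    rw [show (3 * (i : Int) + 0) = ((3 * i : Nat) : Int) by push_cast; ring,
      PySem.List.pyGetD_natCast]
  · apply List.map_congr_left
    intro i _
    rw [show (3 * (i : Int) + 1) = ((3 * i + 1 : Nat) : Int) by push_cast; ring,
      PySem.List.pyGetD_natCast]
  · apply List.map_congr_left
    intro i _
    rw [show (3 * (i : Int) + 2) = ((3 * i + 2 : Nat) : Int) by push_cast; ring,
      PySem.List.pyGetD_natCast]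

-- ===== VERDICT (by name: the statement is the Claim_ definition above) =====
theorem make_matrix_from_text_spec : Claim_equal_make_matrix_from_text := by
  intro text _
  unfold Spec_make_matrix_from_text make_matrix_from_text
  rw [alt_eq]
  have h := mmLoopA_eq text (text.length / 3) 0 [] [] [] (by omega)
  simp only [Nat.cast_zero, mul_zero, zero_add, List.nil_append] at h
  exact h
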